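-- pv_equiv track=rewrite | github.com/ceinnort/picross | traitement_image.py | make_info
-- ===== SOURCE A (Python) =====
-- def make_info(img):
-- 	a_l = []
-- 	a_c = []
-- 	for l in img:
-- 		in_ligne = False
-- 		curr = 0
-- 		info_ligne = []
-- 		for pos in l:
-- 			if (pos == 0):
-- 				curr += 1
-- 				in_ligne = True
-- 			else:
-- 				if in_ligne:
-- 					info_ligne += [curr]
-- 					curr = 0
-- 					in_ligne = False
-- 		if curr > 0:
-- 			info_ligne += [curr]
-- 		#  if ( info_ligne != [] ): a_l += [info_ligne]
-- 		a_l += [info_ligne]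
-- 	for x in range(len(img[0])):
-- 		in_ligne = False
-- 		curr = 0
-- 		info_ligne = []
-- 		for y in range(len(img)):
-- 			if (img[y][x] == 0):
-- 				curr += 1
-- 				in_ligne = True
-- 			else:
-- 				if in_ligne:
-- 					info_ligne += [curr]
-- 					curr = 0
-- 					in_ligne = False
-- 		if curr > 0:
-- 			info_ligne += [curr]
-- 		#  if ( info_ligne != [] ): a_c += [info_ligne]
-- 		a_c += [info_ligne]
-- 	return a_l, a_c
-- ===== SOURCE B (Python) =====
-- def make_info(img):
--     def runs(seq):
--         n = len(seq)
--         starts = [i for i in range(n) if seq[i] == 0 and (i == 0 or seq[i - 1] != 0)]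
--         ends = [i + 1 for i in range(n) if seq[i] == 0 and (i == n - 1 or seq[i + 1] != 0)]
--         return [e - s for s, e in zip(starts, ends)]
--     cols = [[img[y][x] for y in range(len(img))] for x in range(len(img[0]))]
--     return [runs(l) for l in img], [runs(c) for c in cols]
-- ===== Notes on version B (the rewrite author's own statement) =====
-- stated objective: alternative
-- what changed: A threads an in_ligne flag and counter through one stateful scan per row/column; B instead detects run BOUNDARIES: two independent index-comprehension passes collect the start positions (zero whose predecessor is nonzero or absent) and end positions (zero whose successor is nonzero or absent) and zip pairs them, each run length being end minus start; columns are materialised once as lists.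
import Mathlib
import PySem

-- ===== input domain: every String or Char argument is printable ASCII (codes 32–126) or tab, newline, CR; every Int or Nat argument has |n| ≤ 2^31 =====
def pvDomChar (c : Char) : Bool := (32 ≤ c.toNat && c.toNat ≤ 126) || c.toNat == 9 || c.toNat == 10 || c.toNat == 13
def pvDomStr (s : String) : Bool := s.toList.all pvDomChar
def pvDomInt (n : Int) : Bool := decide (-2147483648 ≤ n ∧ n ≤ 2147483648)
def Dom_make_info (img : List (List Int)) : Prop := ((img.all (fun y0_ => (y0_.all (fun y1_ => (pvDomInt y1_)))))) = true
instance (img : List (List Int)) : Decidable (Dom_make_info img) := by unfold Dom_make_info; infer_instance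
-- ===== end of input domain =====

-- B replaces A's flag-and-counter state machine by boundary detection: two filtered index
-- passes collect run starts and run ends, zipped into lengths (same cost; different algorithm).
-- On Pre_ both Pythons return; outside it both raise IndexError.

-- ===== PORT A =====
-- A's inner-loop body: state (in_ligne, curr, info_ligne).
def pvStepA (st : Bool × Int × List Int) (pos : Int) : Bool × Int × List Int :=
  if pos = 0 then (true, st.2.1 + 1, st.2.2)
  else if st.1 then (false, 0, st.2.2 ++ [st.2.1])
  else st

-- A's post-loop 'if curr > 0: info_ligne += [curr]'.
def pvFinishA (st : Bool × Int × List Int) : List Int :=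
  if st.2.1 > 0 then st.2.2 ++ [st.2.1] else st.2.2

-- img[0], img[y], img[y][x] ported with PySem.List.pyGetD: exact on Pre_ (all indices in
-- range there); where Python raises IndexError the input is outside Pre_make_info.
def make_info (img : List (List Int)) : List (List Int) × List (List Int) :=
  let a_l := img.foldl (fun acc l => acc ++ [pvFinishA (l.foldl pvStepA (false, 0, []))]) []
  let a_c := (PySem.List.pyRange 0 (((PySem.List.pyGetD img (0:Int) ([]:List Int)).length : Int)) 1).foldl
    (fun acc x =>
      acc ++ [pvFinishA ((PySem.List.pyRange 0 ((img.length : Int)) 1).foldl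
        (fun st y => pvStepA st (PySem.List.pyGetD (PySem.List.pyGetD img y ([]:List Int)) x 0))
        (false, 0, []))]) []
  (a_l, a_c)

-- ===== PORT B =====
-- Source B's runs(): starts/ends index comprehensions then zip. Indices come from range(n), so
-- every seq[i] is in range; getD's default 1 is only reachable behind the short-circuit '||'
-- (i == 0 / i == n-1), exactly where Python's 'or' does not evaluate the subscript either.
def pvRunsB (seq : List Int) : List Int :=
  let n := seq.length
  let starts := (List.range n).filter (fun i =>
    decide (seq.getD i 1 = 0) && (decide (i = 0) || decide (seq.getD (i-1) 1 ≠ 0)))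
  let ends := ((List.range n).filter (fun i =>
    decide (seq.getD i 1 = 0) && (decide (i = n-1) || decide (seq.getD (i+1) 1 ≠ 0)))).map (fun i => i+1)
  List.zipWith (fun (s e : Nat) => (e : Int) - (s : Int)) starts ends

def make_info_alt (img : List (List Int)) : List (List Int) × List (List Int) :=
  let cols := (PySem.List.pyRange 0 (((PySem.List.pyGetD img (0:Int) ([]:List Int)).length : Int)) 1).map
    (fun x => (PySem.List.pyRange 0 ((img.length : Int)) 1).map
      (fun y => PySem.List.pyGetD (PySem.List.pyGetD img y ([]:List Int)) x 0))
  (img.map pvRunsB, cols.map pvRunsB)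

-- ===== PRECONDITION & SPEC =====
-- Pre_ excludes exactly the inputs where Python A raises IndexError: the empty image (img[0])
-- and jagged images with a row shorter than row 0 (img[y][x]); B raises there too.
def Pre_make_info (img : List (List Int)) : Prop :=
  img ≠ [] ∧ ∀ row ∈ img, (img.headI).length ≤ row.length

instance (img : List (List Int)) : Decidable (Pre_make_info img) := by
  unfold Pre_make_info; infer_instance

def pvWitness_make_info : List (List Int) := [[0, 1, 0], [0, 0, 0]]

def Spec_make_info (img : List (List Int)) (out : List (List Int) × List (List Int)) : Prop := out = make_info_alt img
instance (img : List (List Int)) (out : List (List Int) × List (List Int)) : Decidable (Spec_make_info img out) := by unfold Spec_make_info; infer_instance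

-- ===== CLAIM (what is proved, stated in full; the proofs are below) =====
def Claim_equal_make_info : Prop := ∀ (img : List (List Int)), Dom_make_info img → Pre_make_info img → Spec_make_info img (make_info img)

-- ===== LEMMAS AND PROOFS =====

-- canonical recursion both sides are reduced to: runs of zeros with a pending count curr
def pvRunsAux (curr : Nat) : List Int → List Int
  | [] => if 0 < curr then [(curr : Int)] else []
  | x :: xs =>
    if x = 0 then pvRunsAux (curr + 1) xs
    else if 0 < curr then (curr : Int) :: pvRunsAux 0 xs else pvRunsAux 0 xs

-- A side: the flag/counter fold computes pvRunsAux
theorem pvFoldA_eq (l : List Int) : ∀ (curr : Nat) (info : List Int),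
    pvFinishA (l.foldl pvStepA (decide (0 < curr), (curr : Int), info)) = info ++ pvRunsAux curr l := by
  induction l with
  | nil =>
    intro curr info
    by_cases hc : 0 < curr <;>
      simp [pvFinishA, pvRunsAux, hc, Int.natCast_pos]
  | cons x xs ih =>
    intro curr info
    rw [List.foldl_cons]
    by_cases hx : x = 0
    · rw [show pvStepA (decide (0 < curr), (curr : Int), info) x
          = (decide (0 < curr + 1), ((curr + 1 : Nat) : Int), info) from by
        simp [pvStepA, hx]]
      rw [ih]
      simp [pvRunsAux, hx]
    · by_cases hc : 0 < curr
      · rw [show pvStepA (decide (0 < curr), (curr : Int), info) x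
            = (decide (0 < 0), ((0 : Nat) : Int), info ++ [(curr : Int)]) from by
          simp [pvStepA, hx, hc]]
        rw [ih]
        simp [pvRunsAux, hx, hc]
      · have h0 : curr = 0 := by omega
        subst h0
        rw [show pvStepA (decide (0 < 0), ((0 : Nat) : Int), info) x
            = (decide (0 < 0), ((0 : Nat) : Int), info) from by
          simp [pvStepA, hx]]
        rw [ih]
        simp [pvRunsAux, hx]

theorem pvRunA_eq (l : List Int) :
    pvFinishA (l.foldl pvStepA (false, 0, [])) = pvRunsAux 0 l := by
  have := pvFoldA_eq l 0 []
  simpa using this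

-- B side: recursive characterisations of the start- and end-index comprehensions.
-- pvS p seq = start indices of zero runs of seq given previous element p.
def pvS (p : Int) : List Int → List Nat
  | [] => []
  | x :: xs => (if x = 0 ∧ p ≠ 0 then [0] else []) ++ (pvS x xs).map (· + 1)

-- pvE seq = indices i with seq[i] = 0 and successor (default 1) nonzero.
def pvE : List Int → List Nat
  | [] => []
  | x :: xs => (if x = 0 ∧ xs.getD 0 1 ≠ 0 then [0] else []) ++ (pvE xs).map (· + 1)

-- generalized start predicate (p = previous element; sentinel 1 at top level)
def pvSP (p : Int) (seq : List Int) (i : Nat) : Bool :=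
  decide (seq.getD i 1 = 0) &&
    ((decide (i = 0) && decide (p ≠ 0)) || (decide (i ≠ 0) && decide (seq.getD (i-1) 1 ≠ 0)))

theorem pvSP_succ (p x : Int) (xs : List Int) (i : Nat) :
    pvSP p (x :: xs) (i + 1) = pvSP x xs i := by
  cases i with
  | zero => simp [pvSP]
  | succ j => simp [pvSP]

theorem pvS_filter (seq : List Int) : ∀ p : Int,
    (List.range seq.length).filter (pvSP p seq) = pvS p seq := by
  induction seq with
  | nil => intro p; simp [pvS]
  | cons x xs ih =>
    intro p
    rw [List.length_cons, List.range_succ_eq_map, List.filter_cons, List.filter_map]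
    have h1 : (pvSP p (x :: xs)) ∘ Nat.succ = pvSP x xs := by
      funext i; exact pvSP_succ p x xs i
    rw [h1, ih x]
    by_cases hx : x = 0 <;> by_cases hp : p ≠ 0 <;>
      simp [pvS, pvSP, hx, hp]

-- normalized end predicate: the 'i = n-1' disjunct is absorbed by getD's default 1
def pvEP (seq : List Int) (i : Nat) : Bool :=
  decide (seq.getD i 1 = 0) && decide (seq.getD (i+1) 1 ≠ 0)

theorem pvEP_succ (x : Int) (xs : List Int) (i : Nat) :
    pvEP (x :: xs) (i + 1) = pvEP xs i := by
  simp [pvEP]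

theorem pvE_filter (seq : List Int) :
    (List.range seq.length).filter (pvEP seq) = pvE seq := by
  induction seq with
  | nil => simp [pvE]
  | cons x xs ih =>
    rw [List.length_cons, List.range_succ_eq_map, List.filter_cons, List.filter_map]
    have h1 : (pvEP (x :: xs)) ∘ Nat.succ = pvEP xs := by
      funext i; exact pvEP_succ x xs i
    rw [h1, ih]
    by_cases hx : x = 0 <;> by_cases hn : xs[0]?.getD 1 = 0 <;>
      simp [pvE, pvEP, hx, hn, List.getD]

-- the zip payload, with the ends' (+1) folded in
def pvG (s e : Nat) : Int := ((e : Int) + 1) - (s : Int)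

theorem pvG_shift (k : Nat) : ∀ (S E : List Nat),
    List.zipWith pvG (S.map (· + k)) (E.map (· + k)) = List.zipWith pvG S E := by
  intro S
  induction S with
  | nil => intro E; simp
  | cons s S ih =>
    intro E
    cases E with
    | nil => simp
    | cons e E =>
      simp only [List.map_cons, List.zipWith_cons_cons, ih]
      congr 1
      simp [pvG]; omega

-- main lemma: boundary zip equals the canonical run recursion (Q = top level, M = mid-run)
theorem pvZip_eq (seq : List Int) :
    (∀ p : Int, p ≠ 0 → List.zipWith pvG (pvS p seq) (pvE seq) = pvRunsAux 0 seq)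
    ∧ (∀ c : Nat, 1 ≤ c →
        List.zipWith pvG (0 :: (pvS 0 seq).map (· + c)) ((pvE (0 :: seq)).map (· + (c-1)))
          = pvRunsAux c seq) := by
  induction seq with
  | nil =>
    constructor
    · intro p hp; simp [pvS, pvE, pvRunsAux]
    · intro c hc
      simp only [pvS, pvE, List.getD]
      norm_num [pvRunsAux, hc, pvG]
      omega
  | cons x xs ih =>
    obtain ⟨ihQ, ihM⟩ := ih
    constructor
    · intro p hp
      by_cases hx : x = 0
      · subst hx
        have h1 : pvS p (0 :: xs) = 0 :: (pvS 0 xs).map (· + 1) := by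
          simp [pvS, hp]
        have h2 := ihM 1 (le_refl 1)
        simp only [Nat.sub_self] at h2
        have h3 : (pvE (0 :: xs)).map (· + 0) = pvE (0 :: xs) := by simp
        rw [h1, show pvRunsAux 0 (0 :: xs) = pvRunsAux 1 xs from by simp [pvRunsAux]]
        rw [← h2, h3]
      · have h1 : pvS p (x :: xs) = (pvS x xs).map (· + 1) := by simp [pvS, hx]
        have h2 : pvE (x :: xs) = (pvE xs).map (· + 1) := by simp [pvE, hx]
        rw [h1, h2, pvG_shift, ihQ x hx,
          show pvRunsAux 0 (x :: xs) = pvRunsAux 0 xs from by simp [pvRunsAux, hx]]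
    · intro c hc
      by_cases hx : x = 0
      · subst hx
        have h1 : pvS 0 (0 :: xs) = (pvS 0 xs).map (· + 1) := by simp [pvS]
        have h2 : pvE (0 :: 0 :: xs) = (pvE (0 :: xs)).map (· + 1) := by
          simp [pvE, List.getD]
        have h3 := ihM (c + 1) (by omega)
        have f1 : ((fun x : Nat => x + c) ∘ (fun x : Nat => x + 1)) = (fun x : Nat => x + (c + 1)) := by
          funext i; simp [Function.comp]; omega
        have f2 : ((fun x : Nat => x + (c - 1)) ∘ (fun x : Nat => x + 1)) = (fun x : Nat => x + (c + 1 - 1)) := by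
          funext i; simp [Function.comp]; omega
        rw [h1, h2, List.map_map, List.map_map, f1, f2,
          show pvRunsAux c (0 :: xs) = pvRunsAux (c+1) xs from by simp [pvRunsAux]]
        exact h3
      · have h1 : pvS 0 (x :: xs) = (pvS x xs).map (· + 1) := by simp [pvS]
        have h2 : pvE (0 :: x :: xs) = 0 :: ((pvE xs).map (· + 1)).map (· + 1) := by
          simp [pvE, List.getD, hx]
        have f1 : ((fun x : Nat => x + c) ∘ (fun x : Nat => x + 1)) = (fun x : Nat => x + (c + 1)) := by
          funext i; simp [Function.comp]; omega
        have f2 : ((fun x : Nat => x + (c - 1)) ∘ (fun x : Nat => x + 1) ∘ (fun x : Nat => x + 1))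
            = (fun x : Nat => x + (c + 1)) := by
          funext i; simp [Function.comp]; omega
        rw [h1, h2]
        simp only [List.map_cons, List.map_map, List.zipWith_cons_cons]
        rw [f1, f2, pvG_shift, ihQ x hx,
          show pvRunsAux c (x :: xs) = (c : Int) :: pvRunsAux 0 xs from by
            simp [pvRunsAux, hx]; omega]
        congr 1
        simp [pvG]; omega

-- pvRunsB computes the canonical run recursion
theorem pvRunsB_eq (seq : List Int) : pvRunsB seq = pvRunsAux 0 seq := by
  unfold pvRunsB
  have hS : (fun i => decide (seq.getD i 1 = 0) && (decide (i = 0) || decide (seq.getD (i-1) 1 ≠ 0)))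
      = pvSP 1 seq := by
    funext i
    cases i with
    | zero => simp [pvSP]
    | succ j => simp [pvSP]
  have hE : (List.range seq.length).filter (fun i =>
      decide (seq.getD i 1 = 0) && (decide (i = seq.length - 1) || decide (seq.getD (i+1) 1 ≠ 0)))
      = (List.range seq.length).filter (pvEP seq) := by
    apply List.filter_congr
    intro i hi
    rw [List.mem_range] at hi
    by_cases hl : i = seq.length - 1
    · subst hl
      have h2 : seq[seq.length - 1 + 1]? = none := by
        apply List.getElem?_eq_none
        omega
      simp [pvEP, List.getD, h2]
    · simp [pvEP, hl]
  simp only [hS, hE, pvS_filter, pvE_filter]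
  rw [List.zipWith_map_right]
  have hg : (fun (s e : Nat) => ((e + 1 : Nat) : Int) - (s : Int)) = pvG := by
    funext s e; simp [pvG]
  rw [hg]
  exact (pvZip_eq seq).1 1 one_ne_zero

-- the two run extractors agree
theorem pvRow_eq (l : List Int) :
    pvFinishA (l.foldl pvStepA (false, 0, [])) = pvRunsB l := by
  rw [pvRunA_eq, pvRunsB_eq]

-- ===== VERDICT (by name: the statement is the Claim_ definition above) =====
theorem make_info_spec : Claim_equal_make_info := by
  intro img _ _
  unfold Spec_make_info make_info make_info_alt
  refine Prod.ext ?_ ?_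
  · simp only []
    rw [PySem.List.foldl_append_singleton_eq_map]
    exact List.map_congr_left (fun l _ => pvRow_eq l)
  · simp only []
    rw [PySem.List.foldl_append_singleton_eq_map, List.map_map]
    refine List.map_congr_left (fun x _ => ?_)
    simp only [Function.comp]
    have hcol : (PySem.List.pyRange 0 ((img.length : Int)) 1).map
        (fun y => PySem.List.pyGetD (PySem.List.pyGetD img y ([]:List Int)) x 0)
        = img.map (fun row => PySem.List.pyGetD row x 0) := by
      rw [show (fun y => PySem.List.pyGetD (PySem.List.pyGetD img y ([]:List Int)) x 0)
          = (fun row => PySem.List.pyGetD row x 0) ∘ (fun y => PySem.List.pyGetD img y ([]:List Int)) from rfl,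
        ← List.map_map, PySem.List.map_pyGetD_pyRange_zero']
    rw [hcol, ← pvRow_eq (img.map (fun row => PySem.List.pyGetD row x 0))]
    congr 1
    rw [List.foldl_map]
    exact PySem.List.foldl_pyRange_zero_pyGetD' img ([] : List Int)
      (fun st row => pvStepA st (PySem.List.pyGetD row x 0)) (false, 0, [])
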